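-- pv_equiv track=rewrite | github.com/LennyBalaneta/OCEV | FuncoesFitness.py | fitParImpar
-- ===== SOURCE A (Python) =====
-- def fitParImpar(cromossomo):
--     '''Funcao fitness para problema dos ints alternados par/impar'''
--     f = 0
--     for i in range(len(cromossomo)-1):
--         if cromossomo[i]%2 == 1:
--             if cromossomo[i+1]%2 == 0:
--                 f += 1
--         else:
--             if cromossomo[i+1]%2 == 1:
--                 f += 1
--     return f
-- ===== SOURCE B (Python) =====
-- from itertools import groupby
--
-- def fitParImpar(cromossomo):
--     '''Funcao fitness para problema dos ints alternados par/impar'''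
--     groups = sum(1 for _ in groupby(cromossomo, key=lambda x: x % 2))
--     return max(groups - 1, 0)
-- ===== Notes on version B (the rewrite author's own statement) =====
-- stated objective: idiomatic
-- what changed: Replaces the index loop with branch pairs by grouping the chromosome into maximal same-parity runs via itertools.groupby and returning the number of runs minus one (clamped to 0 for the empty list).
import Mathlib
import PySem

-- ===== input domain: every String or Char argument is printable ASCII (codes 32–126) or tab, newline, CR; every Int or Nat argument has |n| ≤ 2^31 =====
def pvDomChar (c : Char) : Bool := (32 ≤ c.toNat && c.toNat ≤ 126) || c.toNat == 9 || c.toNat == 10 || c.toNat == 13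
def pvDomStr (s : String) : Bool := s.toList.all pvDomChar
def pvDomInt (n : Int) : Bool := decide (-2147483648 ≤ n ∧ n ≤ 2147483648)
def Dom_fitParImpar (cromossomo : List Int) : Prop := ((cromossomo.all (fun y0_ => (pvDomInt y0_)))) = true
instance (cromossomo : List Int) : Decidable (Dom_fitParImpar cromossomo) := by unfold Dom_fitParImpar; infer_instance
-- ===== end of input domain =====

-- B counts maximal same-parity runs (a groupby) and returns runs-1 clamped at 0, instead of A's index loop; objective: idiomatic.

-- ===== PORT A =====
def fitParImpar (cromossomo : List Int) : Int :=
  (PySem.List.pyRange 0 ((cromossomo.length : Int) - 1) 1).foldl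
    (fun f i =>
      if PySem.Int.mod (PySem.List.pyGetD cromossomo i 0) 2 = 1 then
        if PySem.Int.mod (PySem.List.pyGetD cromossomo (i + 1) 0) 2 = 0 then f + 1 else f
      else
        if PySem.Int.mod (PySem.List.pyGetD cromossomo (i + 1) 0) 2 = 1 then f + 1 else f)
    0

-- ===== PORT B =====
-- number of groups produced by itertools.groupby over the parity-key list
def pvGroups : List Int → Int
  | [] => 0
  | [_] => 1
  | a :: b :: t => (if a = b then 0 else 1) + pvGroups (b :: t)

def fitParImpar_alt (cromossomo : List Int) : Int :=
  max (pvGroups (cromossomo.map (fun x => PySem.Int.mod x 2)) - 1) 0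

-- ===== PRECONDITION & SPEC =====
def Spec_fitParImpar (cromossomo : List Int) (out : Int) : Prop := out = fitParImpar_alt cromossomo
instance (cromossomo : List Int) (out : Int) : Decidable (Spec_fitParImpar cromossomo out) := by unfold Spec_fitParImpar; infer_instance

-- ===== CLAIM (what is proved, stated in full; the proofs are below) =====
def Claim_equal_fitParImpar : Prop := ∀ (cromossomo : List Int), Dom_fitParImpar cromossomo → Spec_fitParImpar cromossomo (fitParImpar cromossomo)

-- ===== LEMMAS AND PROOFS =====

-- A's loop body, over a Nat loop index (proof-side helper)
def pvBody (c : List Int) (f : Int) (k : Nat) : Int :=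
  if PySem.Int.mod (PySem.List.pyGetD c (k : Int) 0) 2 = 1 then
    if PySem.Int.mod (PySem.List.pyGetD c ((k : Int) + 1) 0) 2 = 0 then f + 1 else f
  else
    if PySem.Int.mod (PySem.List.pyGetD c ((k : Int) + 1) 0) 2 = 1 then f + 1 else f

-- number of adjacent differing-parity pairs, by structural recursion (proof-side reference)
def pvDiff : List Int → Int
  | a :: b :: t => (if PySem.Int.mod a 2 = PySem.Int.mod b 2 then 0 else 1) + pvDiff (b :: t)
  | _ => 0

lemma pvDiff_nonneg (c : List Int) : 0 ≤ pvDiff c := by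
  induction c with
  | nil => simp [pvDiff]
  | cons a t ih =>
    cases t with
    | nil => simp [pvDiff]
    | cons b s =>
      simp only [pvDiff] at ih ⊢
      split <;> omega

lemma pvStep (a b f : Int) :
    (if PySem.Int.mod a 2 = 1 then
       if PySem.Int.mod b 2 = 0 then f + 1 else f
     else
       if PySem.Int.mod b 2 = 1 then f + 1 else f)
      = f + (if PySem.Int.mod a 2 = PySem.Int.mod b 2 then 0 else 1) := by
  rw [PySem.Int.mod_eq_emod_of_pos (a := a) (by norm_num),
      PySem.Int.mod_eq_emod_of_pos (a := b) (by norm_num)]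
  split_ifs <;> omega

lemma pvBody_shift (a b : Int) (s : List Int) (g : Int) (k : Nat) :
    pvBody (a :: b :: s) g (k + 1) = pvBody (b :: s) g k := by
  have e1 : PySem.List.pyGetD (a :: b :: s) ((k + 1 : Nat) : Int) 0
      = PySem.List.pyGetD (b :: s) (k : Int) 0 := by
    rw [PySem.List.pyGetD_natCast, PySem.List.pyGetD_natCast]
    simp
  have e2 : PySem.List.pyGetD (a :: b :: s) (((k + 1 : Nat) : Int) + 1) 0
      = PySem.List.pyGetD (b :: s) ((k : Int) + 1) 0 := by
    have h1 : ((k + 1 : Nat) : Int) + 1 = ((k + 2 : Nat) : Int) := by push_cast; ring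
    have h2 : ((k : Int)) + 1 = ((k + 1 : Nat) : Int) := by push_cast; ring
    rw [h1, h2, PySem.List.pyGetD_natCast, PySem.List.pyGetD_natCast]
    simp
  simp only [pvBody, e1, e2]

lemma pvBody_zero (a b : Int) (s : List Int) (f : Int) :
    pvBody (a :: b :: s) f 0 = f + (if PySem.Int.mod a 2 = PySem.Int.mod b 2 then 0 else 1) := by
  have h0 : PySem.List.pyGetD (a :: b :: s) ((0 : Nat) : Int) 0 = a := by
    rw [PySem.List.pyGetD_natCast]; rfl
  have h1 : PySem.List.pyGetD (a :: b :: s) (((0 : Nat) : Int) + 1) 0 = b := by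
    rw [show ((0 : Nat) : Int) + 1 = ((1 : Nat) : Int) by norm_num,
        PySem.List.pyGetD_natCast]
    rfl
  unfold pvBody
  rw [h0, h1]
  exact pvStep a b f

lemma pvFoldlCongr {α β : Type} (l : List β) (f g : α → β → α) (i : α)
    (h : ∀ a b, f a b = g a b) : l.foldl f i = l.foldl g i := by
  induction l generalizing i with
  | nil => rfl
  | cons x xs ih => simp only [List.foldl_cons, h]; exact ih _

lemma pvFoldA (c : List Int) (f : Int) :
    (List.range (c.length - 1)).foldl (pvBody c) f = f + pvDiff c := by
  induction c generalizing f with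
  | nil => simp [pvDiff]
  | cons a t ih =>
    cases t with
    | nil => simp [pvDiff]
    | cons b s =>
      have hlen : (a :: b :: s).length - 1 = s.length + 1 := by simp
      rw [hlen, List.range_succ_eq_map, List.foldl_cons, List.foldl_map, pvBody_zero]
      have hcong : (List.range s.length).foldl
            (fun g k => pvBody (a :: b :: s) g (Nat.succ k))
            (f + (if PySem.Int.mod a 2 = PySem.Int.mod b 2 then 0 else 1))
          = (List.range s.length).foldl (pvBody (b :: s))
            (f + (if PySem.Int.mod a 2 = PySem.Int.mod b 2 then 0 else 1)) := by
        refine pvFoldlCongr _ _ _ _ ?_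
        intro acc x
        exact pvBody_shift a b s acc x
      rw [hcong]
      have hlen2 : s.length = (b :: s).length - 1 := by simp
      rw [hlen2, ih]
      simp only [pvDiff]
      ring

lemma fitParImpar_eq_pvDiff (c : List Int) : fitParImpar c = pvDiff c := by
  unfold fitParImpar
  rw [PySem.List.pyRange_one]
  have hlen : (((c.length : Int) - 1) - 0).toNat = c.length - 1 := by omega
  rw [hlen, List.foldl_map]
  rw [pvFoldlCongr (List.range (c.length - 1)) _ (pvBody c) 0
      (by intro acc k; simp [pvBody])]
  rw [pvFoldA]
  omega

lemma pvGroups_cons (a : Int) (t : List Int) :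
    pvGroups ((a :: t).map (fun x => PySem.Int.mod x 2)) = 1 + pvDiff (a :: t) := by
  induction t generalizing a with
  | nil => simp [pvGroups, pvDiff]
  | cons b s ih =>
    simp only [List.map_cons, pvGroups, pvDiff]
    have := ih b
    simp only [List.map_cons] at this
    rw [this]
    ring

lemma fitParImpar_alt_eq_pvDiff (c : List Int) : fitParImpar_alt c = pvDiff c := by
  unfold fitParImpar_alt
  cases c with
  | nil => simp [pvGroups, pvDiff]
  | cons a t =>
    rw [pvGroups_cons]
    have := pvDiff_nonneg (a :: t)
    omega

-- ===== VERDICT (by name: the statement is the Claim_ definition above) =====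
theorem fitParImpar_spec : Claim_equal_fitParImpar := by
  intro c _
  unfold Spec_fitParImpar
  rw [fitParImpar_eq_pvDiff, fitParImpar_alt_eq_pvDiff]
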